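-- pv_equiv track=rewrite | github.com/aebeljs/VeRLPy | RLE_verif_with_RL/RLE_compressor_1state_transitions/test_1state_RL_rle_compression_transitions.py | get_reward_based_on_states_visited
-- ===== SOURCE A (Python) =====
-- def get_reward_based_on_states_visited(coverage):
--     reward = 0
--     for visited_state in coverage:
--         if(visited_state == '0000-1100'):
--             reward += 10
--         else:
--             reward += 1
--     return reward
-- ===== SOURCE B (Python) =====
-- def get_reward_based_on_states_visited(coverage):
--     return len(coverage) + 9 * coverage.count('0000-1100')
-- ===== Notes on version B (the rewrite author's own statement) =====
-- stated objective: simpler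
-- what changed: Replaced the accumulator loop by the closed form len(coverage) + 9*count('0000-1100'): each element contributes 1 and each special state 9 extra.
import Mathlib
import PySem

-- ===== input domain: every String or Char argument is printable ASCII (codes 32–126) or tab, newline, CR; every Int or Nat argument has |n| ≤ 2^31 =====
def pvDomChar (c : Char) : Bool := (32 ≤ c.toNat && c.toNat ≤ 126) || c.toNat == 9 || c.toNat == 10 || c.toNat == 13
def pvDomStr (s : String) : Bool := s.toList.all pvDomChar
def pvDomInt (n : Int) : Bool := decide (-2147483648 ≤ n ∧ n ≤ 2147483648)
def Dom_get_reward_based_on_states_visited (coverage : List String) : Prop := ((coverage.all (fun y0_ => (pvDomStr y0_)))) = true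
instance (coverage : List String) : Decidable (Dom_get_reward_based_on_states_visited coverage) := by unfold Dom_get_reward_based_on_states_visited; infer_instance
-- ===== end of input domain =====

-- ===== PORT A =====
-- A: accumulator loop, +10 for '0000-1100' else +1
def get_reward_based_on_states_visited (coverage : List String) : Int :=
  coverage.foldl (fun reward visited_state =>
    if visited_state = "0000-1100" then reward + 10 else reward + 1) 0

-- ===== PORT B =====
-- B (simpler): closed form len + 9*count, no loop/accumulator
def get_reward_based_on_states_visited_alt (coverage : List String) : Int :=
  (coverage.length : Int) + 9 * (PySem.List.count coverage "0000-1100")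

-- ===== PRECONDITION & SPEC =====
def Spec_get_reward_based_on_states_visited (coverage : List String) (out : Int) : Prop := out = get_reward_based_on_states_visited_alt coverage
instance (coverage : List String) (out : Int) : Decidable (Spec_get_reward_based_on_states_visited coverage out) := by unfold Spec_get_reward_based_on_states_visited; infer_instance

-- ===== CLAIM (what is proved, stated in full; the proofs are below) =====
def Claim_equal_get_reward_based_on_states_visited : Prop := ∀ (coverage : List String), Dom_get_reward_based_on_states_visited coverage → Spec_get_reward_based_on_states_visited coverage (get_reward_based_on_states_visited coverage)

-- ===== LEMMAS AND PROOFS =====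

-- ===== VERDICT (by name: the statement is the Claim_ definition above) =====
theorem fold_closed (coverage : List String) (acc : Int) :
    coverage.foldl (fun reward visited_state =>
      if visited_state = "0000-1100" then reward + 10 else reward + 1) acc
    = acc + (coverage.length : Int) + 9 * (PySem.List.count coverage "0000-1100") := by
  induction coverage generalizing acc with
  | nil => simp [PySem.List.count]
  | cons h t ih =>
    simp only [List.foldl, PySem.List.count, List.length_cons]
    by_cases hh : h = "0000-1100" <;>
      simp [hh, ih] <;> ring

theorem get_reward_based_on_states_visited_spec : Claim_equal_get_reward_based_on_states_visited := by
  intro coverage _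
  unfold Spec_get_reward_based_on_states_visited get_reward_based_on_states_visited
    get_reward_based_on_states_visited_alt
  simpa using fold_closed coverage 0
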